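-- pv_equiv track=rewrite | github.com/juniorvfj/trabalho-ssd-matriculas | app/modules/matriculas/application/processamento.py | _verificar_conflito_horario
-- ===== SOURCE A (Python) =====
-- from typing import List, Dict
--
-- def _verificar_conflito_horario(horario_novo: str, horarios_ocupados: List[str]) -> bool:
--     """
--     Verifica se há conflito de horário entre a turma candidata e as turmas
--     já alocadas ao aluno neste período.
--
--     Utiliza o formato serializado de horário acadêmico (ex: '24T34' = terça e quarta,
--     horários 3 e 4 do turno Tarde). Dois horários conflitam se compartilham
--     pelo menos uma combinação dia+turno+slot.
--
--     :param horario_novo: Horário da turma candidata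
--     :param horarios_ocupados: Lista de horários das turmas já alocadas
--     :return: True se houver conflito, False se estiver livre
--     """
--     def parse_horario(h: str) -> set:
--         """Decompõe '24T34' em slots individuais como {('2','T','3'), ('2','T','4'), ...}"""
--         slots = set()
--         dias = []
--         turno = None
--         horas = []
--
--         for char in h:
--             if char.isdigit() and turno is None:
--                 dias.append(char)
--             elif char.isalpha():
--                 turno = char
--             elif char.isdigit() and turno is not None:
--                 horas.append(char)
--
--         for dia in dias:
--             for hora in horas:
--                 slots.add((dia, turno, hora))
--         return slots
--
--     slots_novo = parse_horario(horario_novo)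
--     for horario in horarios_ocupados:
--         slots_existente = parse_horario(horario)
--         if slots_novo & slots_existente:
--             return True
--     return False
-- ===== SOURCE B (Python) =====
-- def _verificar_conflito_horario(horario_novo, horarios_ocupados):
--     """Compare schedule components directly instead of intersecting
--     cartesian-product slot sets: two schedules conflict iff they have the
--     same turno letter, a common day digit and a common hour digit."""
--     def componentes(h):
--         dias, turno, horas = set(), None, set()
--         for char in h:
--             if char.isdigit() and turno is None:
--                 dias.add(char)
--             elif char.isalpha():
--                 turno = char
--             elif char.isdigit():
--                 horas.add(char)
--         return dias, turno, horas
--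
--     dias_n, turno_n, horas_n = componentes(horario_novo)
--     return any(
--         turno_o == turno_n and bool(dias_o & dias_n) and bool(horas_o & horas_n)
--         for dias_o, turno_o, horas_o in map(componentes, horarios_ocupados)
--     )
-- ===== Notes on version B (the rewrite author's own statement) =====
-- stated objective: simpler
-- what changed: B parses each schedule once into a (days-set, turno, hours-set) triple and compares components (same turno, overlapping days, overlapping hours) instead of building and intersecting cartesian-product slot sets.
import Mathlib
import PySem

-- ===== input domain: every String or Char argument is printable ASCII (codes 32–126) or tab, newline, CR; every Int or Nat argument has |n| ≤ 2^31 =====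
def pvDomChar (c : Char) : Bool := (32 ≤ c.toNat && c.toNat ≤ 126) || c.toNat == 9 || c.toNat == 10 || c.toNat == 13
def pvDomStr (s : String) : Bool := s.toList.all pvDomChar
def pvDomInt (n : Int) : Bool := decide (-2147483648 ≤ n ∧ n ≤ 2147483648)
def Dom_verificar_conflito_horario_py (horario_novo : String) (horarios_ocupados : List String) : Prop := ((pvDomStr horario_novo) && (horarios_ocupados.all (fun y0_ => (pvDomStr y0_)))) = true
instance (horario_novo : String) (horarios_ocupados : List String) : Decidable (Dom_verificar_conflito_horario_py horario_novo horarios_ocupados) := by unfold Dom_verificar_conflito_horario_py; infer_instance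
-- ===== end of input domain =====

-- B replaces A's cartesian-product slot sets by a direct comparison of schedule
-- components (day set, turno letter, hour set); objective: simpler.

-- ===== PORT A =====
-- the character scan of parse_horario: dias/turno/horas accumulators
def pvScanA : List Char → List Char × Option Char × List Char → List Char × Option Char × List Char
  | [], st => st
  | c :: rest, (dias, turno, horas) =>
    pvScanA rest
      (if PySem.Chars.isdigit c && turno.isNone then (dias ++ [c], turno, horas)
       else if PySem.Chars.isalpha c then (dias, some c, horas)
       else if PySem.Chars.isdigit c && turno.isSome then (dias, turno, horas ++ [c])
       else (dias, turno, horas))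

-- parse_horario: builds the set of (dia, turno, hora) slots by nested loops
def pvParseHorario (h : String) : PySem.Set (Char × Option Char × Char) :=
  match pvScanA h.toList ([], none, []) with
  | (dias, turno, horas) =>
    dias.foldl (fun s d => horas.foldl (fun s2 hr => PySem.Set.add s2 (d, turno, hr)) s) PySem.Set.empty

-- the loop over horarios_ocupados with early return True
def pvLoopA (slots_novo : PySem.Set (Char × Option Char × Char)) : List String → Bool
  | [] => false
  | horario :: rest =>
    if !(PySem.Set.inter slots_novo (pvParseHorario horario)).isEmpty then true
    else pvLoopA slots_novo rest

def verificar_conflito_horario_py (horario_novo : String) (horarios_ocupados : List String) : Bool :=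
  pvLoopA (pvParseHorario horario_novo) horarios_ocupados

-- ===== PORT B =====
-- componentes: one scan building (day set, turno, hour set)
def pvComponentes : List Char → PySem.Set Char × Option Char × PySem.Set Char → PySem.Set Char × Option Char × PySem.Set Char
  | [], st => st
  | c :: rest, (dias, turno, horas) =>
    pvComponentes rest
      (if PySem.Chars.isdigit c && turno.isNone then (PySem.Set.add dias c, turno, horas)
       else if PySem.Chars.isalpha c then (dias, some c, horas)
       else if PySem.Chars.isdigit c then (dias, turno, PySem.Set.add horas c)
       else (dias, turno, horas))

def pvComp (h : String) : PySem.Set Char × Option Char × PySem.Set Char :=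
  pvComponentes h.toList (PySem.Set.empty, none, PySem.Set.empty)

def verificar_conflito_horario_py_alt (horario_novo : String) (horarios_ocupados : List String) : Bool :=
  match pvComp horario_novo with
  | (dias_n, turno_n, horas_n) =>
    horarios_ocupados.any (fun h =>
      match pvComp h with
      | (dias_o, turno_o, horas_o) =>
        turno_o == turno_n && !(PySem.Set.inter dias_o dias_n).isEmpty
          && !(PySem.Set.inter horas_o horas_n).isEmpty)

-- ===== PRECONDITION & SPEC =====
def Spec_verificar_conflito_horario_py (horario_novo : String) (horarios_ocupados : List String) (out : Bool) : Prop := out = verificar_conflito_horario_py_alt horario_novo horarios_ocupados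
instance (horario_novo : String) (horarios_ocupados : List String) (out : Bool) : Decidable (Spec_verificar_conflito_horario_py horario_novo horarios_ocupados out) := by unfold Spec_verificar_conflito_horario_py; infer_instance

-- ===== CLAIM (what is proved, stated in full; the proofs are below) =====
def Claim_equal_verificar_conflito_horario_py : Prop := ∀ (horario_novo : String) (horarios_ocupados : List String), Dom_verificar_conflito_horario_py horario_novo horarios_ocupados → Spec_verificar_conflito_horario_py horario_novo horarios_ocupados (verificar_conflito_horario_py horario_novo horarios_ocupados)

-- ===== LEMMAS AND PROOFS =====

-- B's scan computes the deduplicated A-scan accumulators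
theorem pvComponentes_eq_ofList_scanA (h : List Char) (dias horas : List Char) (turno : Option Char) :
    pvComponentes h (PySem.Set.ofList dias, turno, PySem.Set.ofList horas)
      = match pvScanA h (dias, turno, horas) with
        | (d, t, hr) => (PySem.Set.ofList d, t, PySem.Set.ofList hr) := by
  induction h generalizing dias turno horas with
  | nil => simp [pvComponentes, pvScanA]
  | cons c rest ih =>
    simp only [pvComponentes, pvScanA]
    cases turno with
    | none =>
      by_cases hd : PySem.Chars.isdigit c = true
      · simpa [hd, ← PySem.Set.ofList_append_singleton] using ih (dias ++ [c]) horas none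
      · by_cases ha : PySem.Chars.isalpha c = true
        · simpa [hd, ha] using ih dias horas (some c)
        · simpa [hd, ha] using ih dias horas none
    | some t =>
      by_cases ha : PySem.Chars.isalpha c = true
      · simpa [ha] using ih dias horas (some c)
      · by_cases hd : PySem.Chars.isdigit c = true
        · simpa [hd, ha, ← PySem.Set.ofList_append_singleton] using ih dias (horas ++ [c]) (some t)
        · simpa [hd, ha] using ih dias horas (some t)

-- membership in the product-slot set A builds
theorem pvMem_product (dias horas : List Char) (turno : Option Char)
    (init : PySem.Set (Char × Option Char × Char)) (x : Char × Option Char × Char) :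
    x ∈ dias.foldl (fun s d => horas.foldl (fun s2 hr => PySem.Set.add s2 (d, turno, hr)) s) init
      ↔ x ∈ init ∨ (x.1 ∈ dias ∧ x.2.1 = turno ∧ x.2.2 ∈ horas) := by
  induction dias generalizing init with
  | nil => simp
  | cons d ds ih =>
    simp only [List.foldl_cons, ih]
    rw [PySem.Set.mem_foldl_add]
    constructor
    · rintro ((hx | ⟨hr, hhr, rfl⟩) | h)
      · exact Or.inl hx
      · exact Or.inr ⟨List.mem_cons_self, rfl, hhr⟩
      · exact Or.inr ⟨List.mem_cons_of_mem _ h.1, h.2⟩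
    · rintro (hx | ⟨hd, ht, hh⟩)
      · exact Or.inl (Or.inl hx)
      · rcases List.mem_cons.mp hd with rfl | hd'
        · refine Or.inl (Or.inr ⟨x.2.2, hh, ?_⟩)
          obtain ⟨a, b, c⟩ := x; simp_all
        · exact Or.inr ⟨hd', ht, hh⟩

-- a Set intersection is nonempty iff the two sets share an element
theorem pvInter_nonempty {α : Type} [BEq α] [LawfulBEq α] (s t : PySem.Set α) :
    (!(PySem.Set.inter s t).isEmpty) = true ↔ ∃ x, x ∈ s ∧ x ∈ t := by
  rw [Bool.not_eq_eq_eq_not, Bool.not_true, List.isEmpty_eq_false_iff_exists_mem]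
  exact ⟨fun ⟨x, hx⟩ => ⟨x, (PySem.Set.mem_inter s t x).mp hx⟩,
         fun ⟨x, hx⟩ => ⟨x, (PySem.Set.mem_inter s t x).mpr hx⟩⟩

-- per-schedule pair: A's slot-set intersection test equals B's component test
theorem pvPair_eq (hn ho : String) :
    (!(PySem.Set.inter (pvParseHorario hn) (pvParseHorario ho)).isEmpty)
      = (match pvComp hn with
         | (dias_n, turno_n, horas_n) =>
           match pvComp ho with
           | (dias_o, turno_o, horas_o) =>
             turno_o == turno_n && !(PySem.Set.inter dias_o dias_n).isEmpty
               && !(PySem.Set.inter horas_o horas_n).isEmpty) := by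
  have comp : ∀ s : String, pvComp s
      = (PySem.Set.ofList (pvScanA s.toList ([], none, [])).1,
         (pvScanA s.toList ([], none, [])).2.1,
         PySem.Set.ofList (pvScanA s.toList ([], none, [])).2.2) := fun s => by
    simpa [pvComp] using pvComponentes_eq_ofList_scanA s.toList [] [] none
  rcases en : pvScanA hn.toList ([], none, []) with ⟨dn, tn, hrn⟩
  rcases eo : pvScanA ho.toList ([], none, []) with ⟨dO, tO, hrO⟩
  have cn := comp hn; rw [en] at cn
  have co := comp ho; rw [eo] at co
  rw [Bool.eq_iff_iff]
  simp only [pvParseHorario, en, eo, cn, co, Bool.and_eq_true, beq_iff_eq,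
    pvInter_nonempty, pvMem_product, PySem.Set.mem_ofList, PySem.Set.empty,
    List.not_mem_nil, false_or]
  constructor
  · rintro ⟨x, ⟨hd1, ht1, hh1⟩, hd2, ht2, hh2⟩
    exact ⟨⟨ht2.symm.trans ht1, ⟨x.1, hd2, hd1⟩⟩, ⟨x.2.2, hh2, hh1⟩⟩
  · rintro ⟨⟨ht, ⟨d, hdo, hdn⟩⟩, ⟨hr, hho, hhn⟩⟩
    exact ⟨(d, tn, hr), ⟨hdn, rfl, hhn⟩, hdo, ht.symm, hho⟩

theorem pvLoopA_eq_any (s : PySem.Set (Char × Option Char × Char)) (l : List String) :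
    pvLoopA s l = l.any (fun h => !(PySem.Set.inter s (pvParseHorario h)).isEmpty) := by
  induction l with
  | nil => rfl
  | cons h rest ih =>
    simp only [pvLoopA, ih, List.any_cons]
    by_cases hc : (!(PySem.Set.inter s (pvParseHorario h)).isEmpty) = true <;> simp [hc]

theorem pvLoop_eq (hn : String) (occ : List String) :
    pvLoopA (pvParseHorario hn) occ = verificar_conflito_horario_py_alt hn occ := by
  rcases ec : pvComp hn with ⟨dn, tn, hrn⟩
  rw [pvLoopA_eq_any]
  simp only [verificar_conflito_horario_py_alt, ec]
  refine List.any_congr rfl (fun h => ?_)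
  have hp := pvPair_eq hn h
  rw [ec] at hp
  simpa using hp

-- ===== VERDICT (by name: the statement is the Claim_ definition above) =====
theorem verificar_conflito_horario_py_spec : Claim_equal_verificar_conflito_horario_py := by
  intro hn occ _
  unfold Spec_verificar_conflito_horario_py verificar_conflito_horario_py
  exact pvLoop_eq hn occ
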